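-- pv_equiv track=rewrite | github.com/yamchote-ppt/sau-dsa-comp-buss-lab9 | src/expression_eval.py | tokenize
-- ===== SOURCE A (Python) =====
-- def tokenize(expr: str) -> list[str]:
--     """
--     แยกนิพจน์ infix ออกเป็น list ของ token  (เตรียมไว้แล้ว – ไม่ต้องแก้)
--
--     รองรับ: จำนวนเต็ม/ทศนิยม, +, -, *, /, (, ), ช่องว่าง
--
--     ตัวอย่าง:
--         "(3 + 4) * 2"  →  ["(", "3", "+", "4", ")", "*", "2"]
--     """
--     tokens: list[str] = []
--     i = 0
--     while i < len(expr):
--         ch = expr[i]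
--         if ch.isspace():
--             i += 1
--             continue
--         if ch in "+-*/()":
--             tokens.append(ch)
--             i += 1
--         elif ch.isdigit() or ch == ".":
--             # อ่านตัวเลขทั้งหมด (อาจเป็นทศนิยม)
--             j = i
--             while j < len(expr) and (expr[j].isdigit() or expr[j] == "."):
--                 j += 1
--             tokens.append(expr[i:j])
--             i = j
--         else:
--             raise ValueError(f"อักขระที่ไม่รู้จัก: {ch!r}")
--     return tokens
-- ===== SOURCE B (Python) =====
-- from itertools import groupby
--
--
-- def tokenize(expr: str) -> list[str]:
--     def cat(ch: str) -> int:
--         if ch.isspace():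
--             return 0
--         if ch in "+-*/()":
--             return 1
--         if ch.isdigit() or ch == ".":
--             return 2
--         return 3
--
--     tokens: list[str] = []
--     for k, grp in groupby(expr, key=cat):
--         g = "".join(grp)
--         if k == 0:
--             continue
--         elif k == 1:
--             tokens.extend(g)
--         elif k == 2:
--             tokens.append(g)
--         else:
--             raise ValueError(f"อักขระที่ไม่รู้จัก: {g[0]!r}")
--     return tokens
-- ===== Notes on version B (the rewrite author's own statement) =====
-- stated objective: idiomatic
-- what changed: Replaces the explicit two-pointer index scan (outer while with manual i, inner while advancing j over a number) with a single itertools.groupby pass that classifies each character into a category and emits whole maximal runs per group.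
import Mathlib
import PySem

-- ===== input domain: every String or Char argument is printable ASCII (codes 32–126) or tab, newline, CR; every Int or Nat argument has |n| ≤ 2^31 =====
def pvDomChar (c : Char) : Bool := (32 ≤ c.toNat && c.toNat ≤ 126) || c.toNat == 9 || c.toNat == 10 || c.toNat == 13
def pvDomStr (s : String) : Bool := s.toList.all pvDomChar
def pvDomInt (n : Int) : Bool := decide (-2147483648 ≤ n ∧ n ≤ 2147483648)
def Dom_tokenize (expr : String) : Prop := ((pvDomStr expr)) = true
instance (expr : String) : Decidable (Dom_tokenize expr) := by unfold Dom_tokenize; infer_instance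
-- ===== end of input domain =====

-- B replaces A's two-pointer index scan with an itertools.groupby-style pass over
-- maximal runs of one character category (idiomatic; same O(n) cost).


-- ===== PORT A =====
-- `ch in "+-*/()"`
def tokOp (c : Char) : Bool := PySem.Chars.isIn [c] "+-*/()".toList
-- `expr[j].isdigit() or expr[j] == "."`
def tokNum (c : Char) : Bool := PySem.Chars.isdigit c || c == '.'

-- inner `while j < len(expr) and (expr[j].isdigit() or expr[j] == "."): j += 1`
-- (fuel makes the loop structural; cs.length - j steps always suffice)
def tokNumEndGo : Nat → List Char → Nat → Nat
  | 0, _, j => j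
  | fuel + 1, cs, j =>
    if h : j < cs.length then
      if tokNum cs[j] then tokNumEndGo fuel cs (j + 1) else j
    else j

def tokNumEnd (cs : List Char) (j : Nat) : Nat := tokNumEndGo (cs.length - j) cs j

-- outer `while i < len(expr)` loop of A, carrying (i, tokens); fuel as above
def tokGo : Nat → List Char → Nat → List String → List String
  | 0, _, _, tokens => tokens
  | fuel + 1, cs, i, tokens =>
    if h : i < cs.length then
      -- ch = expr[i]
      if PySem.Chars.isspace cs[i] then
        tokGo fuel cs (i + 1) tokens
      else if tokOp cs[i] then
        tokGo fuel cs (i + 1) (tokens ++ [String.ofList [cs[i]]])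
      else if tokNum cs[i] then
        -- j = end of the number run, tokens.append(expr[i:j]), i = j
        tokGo fuel cs (tokNumEnd cs i)
          (tokens ++ [String.ofList (PySem.List.slice cs (some (i : Int)) (some ((tokNumEnd cs i : Nat) : Int)))])
      else
        tokens  -- `raise ValueError(...)`: excluded by Pre_tokenize
    else tokens

def tokenize (expr : String) : List String := tokGo expr.toList.length expr.toList 0 []

-- ===== PORT B =====
-- B's `cat(ch)` classifier
def tokCat (c : Char) : Nat :=
  if PySem.Chars.isspace c then 0
  else if tokOp c then 1
  else if tokNum c then 2
  else 3

-- itertools.groupby: split into maximal runs of equal category (fuel = length)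
def tokChunks : Nat → List Char → List (List Char)
  | 0, _ => []
  | _ + 1, [] => []
  | fuel + 1, c :: rest =>
    (c :: rest.takeWhile (fun d => tokCat d == tokCat c)) ::
      tokChunks fuel (rest.dropWhile (fun d => tokCat d == tokCat c))

-- B's loop body over one (k, group) pair
def tokStep : List String → List Char → List String
  | tokens, [] => tokens
  | tokens, c :: g' =>
    if tokCat c == 0 then tokens
    else if tokCat c == 1 then tokens ++ (c :: g').map (fun d => String.ofList [d])
    else if tokCat c == 2 then tokens ++ [String.ofList (c :: g')]
    else tokens  -- `raise ValueError(...)`: excluded by Pre_tokenize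

def tokenize_alt (expr : String) : List String :=
  (tokChunks expr.toList.length expr.toList).foldl tokStep []

-- ===== PRECONDITION & SPEC =====
-- Pre_ excludes exactly the inputs containing a character outside A's recognised
-- classes (whitespace, "+-*/()", digits, '.'), on which A raises ValueError.
def Pre_tokenize (expr : String) : Prop :=
  expr.toList.all (fun c => PySem.Chars.isspace c || tokOp c || tokNum c) = true
instance (expr : String) : Decidable (Pre_tokenize expr) := by unfold Pre_tokenize; infer_instance

def pvWitness_tokenize : String := "(3 + 4.5) * 12"

def Spec_tokenize (expr : String) (out : List String) : Prop := out = tokenize_alt expr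
instance (expr : String) (out : List String) : Decidable (Spec_tokenize expr out) := by unfold Spec_tokenize; infer_instance

-- ===== CLAIM (what is proved, stated in full; the proofs are below) =====
def Claim_equal_tokenize : Prop := ∀ (expr : String), Dom_tokenize expr → Pre_tokenize expr → Spec_tokenize expr (tokenize expr)

-- ===== LEMMAS AND PROOFS =====

-- common specification: direct recursion emitting one token per step
def tokSpec : List Char → List String
  | [] => []
  | c :: cs =>
    if PySem.Chars.isspace c then tokSpec cs
    else if tokOp c then String.ofList [c] :: tokSpec cs
    else if tokNum c then
      String.ofList (c :: cs.takeWhile tokNum) :: tokSpec (cs.dropWhile tokNum)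
    else []
termination_by cs => cs.length
decreasing_by
  · simp
  · simp
  · simp only [List.length_cons]
    exact Nat.lt_succ_of_le (List.length_dropWhile_le _ _)

theorem tokOp_mem (c : Char) : tokOp c = true ↔ c ∈ "+-*/()".toList := by
  unfold tokOp
  rw [PySem.Chars.isIn_iff_infix]
  exact List.singleton_infix_iff c _

theorem tokNum_not_space (c : Char) (h : tokNum c = true) : PySem.Chars.isspace c = false := by
  have hd : ('0' ≤ c ∧ c ≤ '9') ∨ c = '.' := by
    unfold tokNum PySem.Chars.isdigit at h
    simp at h
    rcases h with h | h
    · exact Or.inl h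
    · exact Or.inr h
  have hn : 46 ≤ c.toNat ∧ c.toNat ≤ 57 := by
    rcases hd with ⟨h1, h2⟩ | h
    · rw [Char.le_def] at h1 h2
      simp [UInt32.le_iff_toNat_le] at h1 h2
      omega
    · subst h; constructor <;> decide
  unfold PySem.Chars.isspace
  simp
  omega

theorem tokNum_not_op (c : Char) (h : tokNum c = true) : tokOp c = false := by
  by_contra hc
  have hop : tokOp c = true := by
    cases hv : tokOp c
    · exact absurd hv hc
    · rfl
  have hmem := (tokOp_mem c).mp hop
  have hcs : c = '+' ∨ c = '-' ∨ c = '*' ∨ c = '/' ∨ c = '(' ∨ c = ')' := by simpa using hmem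
  unfold tokNum at h
  rcases hcs with rfl|rfl|rfl|rfl|rfl|rfl <;> exact absurd h (by decide)

-- takeWhile/dropWhile congruence on members (used to swap tokCat-class for tokNum)
theorem takeWhile_congr_mem {α : Type} (p q : α → Bool) (l : List α)
    (h : ∀ x ∈ l, p x = q x) : l.takeWhile p = l.takeWhile q := by
  induction l with
  | nil => rfl
  | cons a l ih =>
    simp only [List.takeWhile_cons]
    rw [h a (List.mem_cons_self)]
    split
    · rw [ih (fun x hx => h x (List.mem_cons_of_mem a hx))]
    · rfl

theorem dropWhile_congr_mem {α : Type} (p q : α → Bool) (l : List α)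
    (h : ∀ x ∈ l, p x = q x) : l.dropWhile p = l.dropWhile q := by
  induction l with
  | nil => rfl
  | cons a l ih =>
    simp only [List.dropWhile_cons]
    rw [h a (List.mem_cons_self)]
    split
    · exact ih (fun x hx => h x (List.mem_cons_of_mem a hx))
    · rfl

theorem take_takeWhile_length {α : Type} (p : α → Bool) (l : List α) :
    l.take (l.takeWhile p).length = l.takeWhile p := by
  induction l with
  | nil => rfl
  | cons a l ih =>
    simp only [List.takeWhile_cons]
    split
    · simp [List.take_succ_cons, ih]
    · simp

theorem drop_takeWhile_length {α : Type} (p : α → Bool) (l : List α) :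
    l.drop (l.takeWhile p).length = l.dropWhile p := by
  induction l with
  | nil => rfl
  | cons a l ih =>
    simp only [List.takeWhile_cons, List.dropWhile_cons]
    split
    · simpa using ih
    · simp

theorem tokNumEndGo_eq (fuel : Nat) (cs : List Char) (j : Nat) (hf : cs.length - j ≤ fuel) :
    tokNumEndGo fuel cs j = j + ((cs.drop j).takeWhile tokNum).length := by
  induction fuel generalizing j with
  | zero =>
    rw [tokNumEndGo, List.drop_eq_nil_of_le (by omega)]
    simp
  | succ fuel ih =>
    rw [tokNumEndGo]
    split
    · rename_i h
      rw [List.drop_eq_getElem_cons h, List.takeWhile_cons]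
      split
      · rename_i ht
        rw [ih (j + 1) (by omega)]
        simp
        omega
      · simp
    · rename_i h
      rw [List.drop_eq_nil_of_le (by omega)]
      simp

theorem tokNumEnd_eq (cs : List Char) (j : Nat) :
    tokNumEnd cs j = j + ((cs.drop j).takeWhile tokNum).length :=
  tokNumEndGo_eq (cs.length - j) cs j (le_refl _)

-- A's loop equals tokSpec on the remaining suffix
theorem tokGo_eq (fuel : Nat) (cs : List Char) (i : Nat) (tokens : List String)
    (hf : cs.length - i ≤ fuel) :
    tokGo fuel cs i tokens = tokens ++ tokSpec (cs.drop i) := by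
  induction fuel generalizing i tokens with
  | zero =>
    rw [tokGo, List.drop_eq_nil_of_le (by omega)]
    simp [tokSpec]
  | succ fuel ih =>
    rw [tokGo]
    split
    · rename_i h
      rw [List.drop_eq_getElem_cons h, tokSpec]
      by_cases hs : PySem.Chars.isspace cs[i] = true
      · rw [if_pos hs, if_pos hs, ih (i + 1) tokens (by omega)]
      · rw [if_neg hs, if_neg hs]
        by_cases hop : tokOp cs[i] = true
        · rw [if_pos hop, if_pos hop, ih (i + 1) (tokens ++ [String.ofList [cs[i]]]) (by omega)]
          simp
        · rw [if_neg hop, if_neg hop]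
          by_cases hn : tokNum cs[i] = true
          · have he : tokNumEnd cs i = i + 1 + ((cs.drop (i + 1)).takeWhile tokNum).length := by
              rw [tokNumEnd_eq, List.drop_eq_getElem_cons h, List.takeWhile_cons, if_pos hn]
              simp
              omega
            rw [if_pos hn, if_pos hn, ih (tokNumEnd cs i) _ (by omega)]
            have hslice : PySem.List.slice cs (some (i : Int)) (some ((tokNumEnd cs i : Nat) : Int))
                = cs[i] :: (cs.drop (i + 1)).takeWhile tokNum := by
              rw [PySem.List.slice_natCast, he]
              have h2 : i + 1 + ((cs.drop (i + 1)).takeWhile tokNum).length - i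
                  = ((cs.drop (i + 1)).takeWhile tokNum).length + 1 := by omega
              rw [h2, List.drop_eq_getElem_cons h, List.take_succ_cons]
              congr 1
              exact take_takeWhile_length tokNum (cs.drop (i + 1))
            have hdrop : cs.drop (tokNumEnd cs i) = (cs.drop (i + 1)).dropWhile tokNum := by
              rw [he]
              have h3 : cs.drop (i + 1 + ((cs.drop (i + 1)).takeWhile tokNum).length)
                  = (cs.drop (i + 1)).drop ((cs.drop (i + 1)).takeWhile tokNum).length := by
                rw [List.drop_drop]
              rw [h3]
              exact drop_takeWhile_length tokNum (cs.drop (i + 1))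
            rw [hslice, hdrop]
            simp
          · rw [if_neg hn, if_neg hn]
            simp
    · rename_i h
      rw [List.drop_eq_nil_of_le (by omega)]
      simp [tokSpec]

-- dissolving one all-space / all-op run in tokSpec
theorem tokSpec_space_prefix (g r : List Char) (h : ∀ d ∈ g, PySem.Chars.isspace d = true) :
    tokSpec (g ++ r) = tokSpec r := by
  induction g with
  | nil => rfl
  | cons a g ih =>
    rw [List.cons_append, tokSpec]
    rw [if_pos (h a List.mem_cons_self)]
    exact ih (fun d hd => h d (List.mem_cons_of_mem a hd))

theorem tokSpec_op_prefix (g r : List Char)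
    (h : ∀ d ∈ g, PySem.Chars.isspace d = false ∧ tokOp d = true) :
    tokSpec (g ++ r) = g.map (fun d => String.ofList [d]) ++ tokSpec r := by
  induction g with
  | nil => rfl
  | cons a g ih =>
    rw [List.cons_append, tokSpec]
    rw [if_neg (by simp [(h a List.mem_cons_self).1]), if_pos (h a List.mem_cons_self).2]
    rw [ih (fun d hd => h d (List.mem_cons_of_mem a hd))]
    simp

theorem tokCat_eq_zero (d : Char) : tokCat d = 0 ↔ PySem.Chars.isspace d = true := by
  unfold tokCat
  split
  · rename_i h; simp [h]
  · rename_i h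
    constructor
    · intro hc
      split at hc
      · omega
      · split at hc <;> omega
    · intro hc; exact absurd hc h

theorem tokCat_eq_one (d : Char) :
    tokCat d = 1 ↔ PySem.Chars.isspace d = false ∧ tokOp d = true := by
  unfold tokCat
  split
  · rename_i h; simp [h]
  · rename_i h
    rw [Bool.not_eq_true] at h
    split
    · rename_i h2; simp [h, h2]
    · rename_i h2
      constructor
      · intro hc; split at hc <;> omega
      · intro hc; exact absurd hc.2 h2

-- B's fold over the chunks equals tokSpec, given every character is recognised
theorem tokChunks_foldl_eq (fuel : Nat) (cs : List Char) (acc : List String)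
    (hf : cs.length ≤ fuel)
    (hp : ∀ c ∈ cs, PySem.Chars.isspace c = true ∨ tokOp c = true ∨ tokNum c = true) :
    (tokChunks fuel cs).foldl tokStep acc = acc ++ tokSpec cs := by
  induction fuel generalizing cs acc with
  | zero =>
    have : cs = [] := List.eq_nil_of_length_eq_zero (by omega)
    subst this
    simp [tokChunks, tokSpec]
  | succ fuel ih =>
    match cs with
    | [] => simp [tokChunks, tokSpec]
    | c :: rest =>
      rw [tokChunks]
      set g := rest.takeWhile (fun d => tokCat d == tokCat c) with hg
      set rest' := rest.dropWhile (fun d => tokCat d == tokCat c) with hr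
      have hsplit : rest = g ++ rest' := (List.takeWhile_append_dropWhile).symm
      have hgmem : ∀ d ∈ g, tokCat d = tokCat c := by
        intro d hd
        have := List.mem_takeWhile_imp hd
        simpa using this
      have hlen : rest'.length ≤ fuel := by
        have h1 : rest'.length ≤ rest.length := List.length_dropWhile_le _ _
        simp at hf
        omega
      have hrmem : ∀ x ∈ rest', PySem.Chars.isspace x = true ∨ tokOp x = true ∨ tokNum x = true := by
        intro x hx
        exact hp x (List.mem_cons_of_mem c (hsplit ▸ List.mem_append_right g hx))
      rw [List.foldl_cons, ih rest' (tokStep acc (c :: g)) hlen hrmem]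
      rw [show (c :: rest) = c :: (g ++ rest') from by rw [← hsplit]]
      by_cases hs : PySem.Chars.isspace c = true
      · -- whitespace run: dropped on both sides
        have hcat : tokCat c = 0 := by unfold tokCat; rw [if_pos hs]
        rw [tokStep, if_pos (by simp [hcat])]
        rw [tokSpec, if_pos hs, tokSpec_space_prefix g rest'
          (fun d hd => (tokCat_eq_zero d).mp ((hgmem d hd).trans hcat))]
      · by_cases hop : tokOp c = true
        · -- operator run: one token per character
          have hcat : tokCat c = 1 := by unfold tokCat; rw [if_neg hs, if_pos hop]
          rw [tokStep, if_neg (by simp [hcat]), if_pos (by simp [hcat])]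
          rw [tokSpec, if_neg hs, if_pos hop, tokSpec_op_prefix g rest'
            (fun d hd => (tokCat_eq_one d).mp ((hgmem d hd).trans hcat))]
          simp
        · by_cases hn : tokNum c = true
          · -- number run: one token for the whole run
            have hcat : tokCat c = 2 := by unfold tokCat; rw [if_neg hs, if_neg hop, if_pos hn]
            rw [tokStep, if_neg (by simp [hcat]), if_neg (by simp [hcat]), if_pos (by simp [hcat])]
            rw [tokSpec, if_neg hs, if_neg hop, if_pos hn]
            have hpred : ∀ d, (fun d => tokCat d == tokCat c) d = tokNum d := by
              intro d
              rw [hcat]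
              by_cases hnd : tokNum d = true
              · have h2 : tokCat d = 2 := by
                  unfold tokCat
                  rw [if_neg (by simp [tokNum_not_space d hnd]),
                      if_neg (by simp [tokNum_not_op d hnd]), if_pos hnd]
                simp [h2, hnd]
              · have h2 : tokCat d ≠ 2 := by
                  unfold tokCat
                  split
                  · simp
                  · split
                    · simp
                    · simp
                have h3 : tokNum d = false := by
                  cases hv : tokNum d
                  · rfl
                  · exact absurd hv hnd
                simp [h3]
                simpa using h2
            rw [hg, takeWhile_congr_mem _ tokNum rest (fun x _ => hpred x)]
            rw [hr, dropWhile_congr_mem _ tokNum rest (fun x _ => hpred x)]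
            simp
          · -- unknown character: excluded by the hypothesis
            rcases hp c List.mem_cons_self with h | h | h
            · exact absurd h hs
            · exact absurd h hop
            · exact absurd h hn

-- ===== VERDICT (by name: the statement is the Claim_ definition above) =====
theorem tokenize_spec : Claim_equal_tokenize := by
  intro expr _ hpre
  unfold Spec_tokenize tokenize tokenize_alt
  rw [tokGo_eq expr.toList.length expr.toList 0 [] (by omega)]
  simp only [List.drop_zero, List.nil_append]
  rw [tokChunks_foldl_eq expr.toList.length expr.toList [] (le_refl _)]
  · simp
  · intro c hc
    unfold Pre_tokenize at hpre
    rw [List.all_eq_true] at hpre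
    have := hpre c hc
    simp at this
    tauto
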